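-- pv_equiv track=rewrite | github.com/HBSAIKAT/compiler_construction_lab | ccl_7_2254_main.py | _detect_no_print
-- ===== SOURCE A (Python) =====
-- EPSILON = 'ε'  # used for empty remainder if needed
--
-- class _TrieNode:
--     def __init__(self):
--         self.children = {}
--         self.prods = []
--
-- def _choose_char_mode(productions):
--     for p in productions:
--         if ' ' in p:
--             return False  # use space-tokenization
--     return True  # use char-tokenization
--
-- def _tokenize(prod, char_mode):
--     pt = prod.strip()
--     if pt == '' or pt == EPSILON:
--         return []
--     return list(pt) if char_mode else pt.split()
--
-- def _build_trie(productions, char_mode):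
--     root = _TrieNode()
--     for p in productions:
--         tokens = _tokenize(p, char_mode)
--         node = root
--         node.prods.append(p)
--         for t in tokens:
--             if t not in node.children:
--                 node.children[t] = _TrieNode()
--             node = node.children[t]
--             node.prods.append(p)
--     return root
--
-- def _collect_maximal_prefixes(root):
--     results = []
--     def dfs(node, path):
--         child_has_group = False
--         for tok, child in node.children.items():
--             dfs(child, path + [tok])
--             if len(child.prods) >= 2:
--                 child_has_group = True
--         if len(node.prods) >= 2 and not child_has_group and path:
--             results.append((path, list(node.prods)))
--     dfs(root, [])
--     return results
--
-- def _detect_no_print(grammar_items):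
--     factoring_map = {}
--     total_groups = 0
--     for nt, prods in grammar_items:
--         if len(prods) < 2:
--             continue
--         char_mode = _choose_char_mode(prods)
--         root = _build_trie(prods, char_mode)
--         groups = _collect_maximal_prefixes(root)
--         if groups:
--             factoring_map[nt] = (char_mode, groups)
--             total_groups += len(groups)
--     return factoring_map, total_groups
-- ===== SOURCE B (Python) =====
-- EPSILON = 'ε'  # used for empty remainder if needed
--
-- def _choose_char_mode(productions):
--     for p in productions:
--         if ' ' in p:
--             return False  # use space-tokenization
--     return True  # use char-tokenization
--
-- def _tokenize(prod, char_mode):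
--     pt = prod.strip()
--     if pt == '' or pt == EPSILON:
--         return []
--     return list(pt) if char_mode else pt.split()
--
-- def _factor(pairs, path):
--     # pairs: [(production, remaining_tokens)] sharing the prefix `path`
--     keys = []
--     for _, toks in pairs:
--         if toks and toks[0] not in keys:
--             keys.append(toks[0])
--     results = []
--     child_big = False
--     for tok in keys:
--         bucket = [(p, toks[1:]) for p, toks in pairs if toks and toks[0] == tok]
--         if len(bucket) >= 2:
--             child_big = True
--         results.extend(_factor(bucket, path + [tok]))
--     if len(pairs) >= 2 and not child_big and path:
--         results.append((path, [p for p, _ in pairs]))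
--     return results
--
-- def _detect_no_print(grammar_items):
--     factoring_map = {}
--     total_groups = 0
--     for nt, prods in grammar_items:
--         if len(prods) < 2:
--             continue
--         char_mode = _choose_char_mode(prods)
--         groups = _factor([(p, _tokenize(p, char_mode)) for p in prods], [])
--         if groups:
--             factoring_map[nt] = (char_mode, groups)
--             total_groups += len(groups)
--     return factoring_map, total_groups
-- ===== Notes on version B (the rewrite author's own statement) =====
-- stated objective: alternative
-- what changed: Replaced the explicit mutable trie (build all nodes, then a separate DFS collection pass) by a single recursive divide-and-conquer that partitions the productions by their next token in first-appearance order and emits a group when no bucket keeps two or more members.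
import Mathlib
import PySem

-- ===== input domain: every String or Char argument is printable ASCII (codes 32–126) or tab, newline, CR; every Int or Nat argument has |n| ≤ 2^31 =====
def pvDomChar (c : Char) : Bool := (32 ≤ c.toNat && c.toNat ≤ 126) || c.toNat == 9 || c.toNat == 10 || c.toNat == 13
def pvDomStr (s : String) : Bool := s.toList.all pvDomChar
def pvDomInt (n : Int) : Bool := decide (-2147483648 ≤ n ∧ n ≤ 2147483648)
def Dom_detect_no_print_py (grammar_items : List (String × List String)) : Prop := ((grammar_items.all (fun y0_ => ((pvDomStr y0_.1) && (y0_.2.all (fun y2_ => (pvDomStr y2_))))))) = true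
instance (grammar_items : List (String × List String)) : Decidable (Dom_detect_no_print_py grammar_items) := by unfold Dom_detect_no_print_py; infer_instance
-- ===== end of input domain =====

-- B replaces A's explicit mutable trie (build pass + separate DFS collection pass) by one
-- recursive partition-by-next-token pass; objective: alternative (same result, no speed claim).

-- ===== PORT A =====
-- helpers shared verbatim by both Pythons (_choose_char_mode, _tokenize)
def pvChooseCharMode : List String → Bool
  | [] => true
  | p :: rest => if PySem.Str.isIn " " p then false else pvChooseCharMode rest

def pvTokenize (prod : String) (charMode : Bool) : List String :=
  let pt := PySem.Str.strip prod
  if pt = "" ∨ pt = "ε" then []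
  else if charMode then pt.toList.map (fun c => String.ofList [c]) else PySem.Str.split₀ pt

-- the trie (_TrieNode); children as an explicit child-list type (no nested inductive)
mutual
inductive PVTrie : Type
  | mk : List String → PVChildren → PVTrie
inductive PVChildren : Type
  | nil : PVChildren
  | cons : String → PVTrie → PVChildren → PVChildren
end

def PVTrie.prods : PVTrie → List String
  | .mk ps _ => ps

-- the inner token loop of _build_trie: append p to every node along the token path,
-- creating children as needed (dict semantics: update first matching key in place, append new keys)
mutual
def pvTrieInsert : PVTrie → String → List String → PVTrie
  | .mk prods ch, p, [] => .mk (prods ++ [p]) ch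
  | .mk prods ch, p, t :: rest => .mk (prods ++ [p]) (pvChildInsert ch t p rest)
  termination_by _ _ toks => ((toks.length : Nat), 0, (0 : Nat))
def pvChildInsert : PVChildren → String → String → List String → PVChildren
  | .nil, t, p, rest => .cons t (pvTrieInsert (.mk [] .nil) p rest) .nil
  | .cons k c tail, t, p, rest =>
      if k = t then .cons k (pvTrieInsert c p rest) tail
      else .cons k c (pvChildInsert tail t p rest)
  termination_by ch _ _ rest => ((rest.length : Nat), 1, sizeOf ch)
end

def pvBuildTrie (productions : List String) (charMode : Bool) : PVTrie :=
  productions.foldl (fun root p => pvTrieInsert root p (pvTokenize p charMode)) (.mk [] .nil)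

-- the child_has_group flag of _collect_maximal_prefixes (len(child.prods) >= 2 over the children)
def pvAnyGroup : PVChildren → Bool
  | .nil => false
  | .cons _ c tail => decide (2 ≤ c.prods.length) || pvAnyGroup tail

-- dfs of _collect_maximal_prefixes: children results in insertion order, then this node's group
mutual
def pvDfs : PVTrie → List String → List (List String × List String)
  | .mk prods ch, path =>
      pvDfsC ch path ++
        (if 2 ≤ prods.length ∧ pvAnyGroup ch = false ∧ path ≠ [] then [(path, prods)] else [])
def pvDfsC : PVChildren → List String → List (List String × List String)
  | .nil, _ => []
  | .cons tok c tail, path => pvDfs c (path ++ [tok]) ++ pvDfsC tail path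
end

def detect_no_print_py (grammar_items : List (String × List String)) : (List (String × Bool × (List (List String × List String)))) × Int :=
  let res := grammar_items.foldl
    (fun (st : PySem.Dict String (Bool × List (List String × List String)) × Int) item =>
      if item.2.length < 2 then st
      else
        let charMode := pvChooseCharMode item.2
        let root := pvBuildTrie item.2 charMode
        let groups := pvDfs root []
        if groups ≠ [] then (st.1.insert item.1 (charMode, groups), st.2 + (groups.length : Int))
        else st)
    (PySem.Dict.empty, 0)
  (res.1.items, res.2)

-- ===== PORT B =====
-- first-appearance-ordered next tokens of the pairs still holding tokens (keys loop of _factor)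
def pvBKeys (ps : List (String × List String)) : List String :=
  ps.foldl (fun ks x => match x.2 with
    | [] => ks
    | t :: _ => if t ∈ ks then ks else ks ++ [t]) []

-- the bucket comprehension of _factor
def pvBucket (ps : List (String × List String)) (tok : String) : List (String × List String) :=
  ps.filterMap (fun x => match x.2 with
    | [] => none
    | t :: r => if t = tok then some (x.1, r) else none)

def pvSumLen (ps : List (String × List String)) : Nat := (ps.map (fun x => x.2.length)).sum

theorem pvBucket_sumLen_le (ps : List (String × List String)) (tok : String) :
    pvSumLen (pvBucket ps tok) + (pvBucket ps tok).length ≤ pvSumLen ps := by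
  induction ps with
  | nil => simp [pvBucket, pvSumLen]
  | cons x rest ih =>
    rcases x with ⟨p, toks⟩
    cases toks with
    | nil => simpa [pvBucket, pvSumLen] using ih
    | cons t r =>
      by_cases h : t = tok <;> simp [pvBucket, pvSumLen, h] at ih ⊢ <;> omega

-- recursive partition-by-next-token (_factor); the empty-bucket guard only serves termination
-- (a key always has a nonempty bucket) and returns what _factor returns on an empty list: []
mutual
def pvFactor (ps : List (String × List String)) (path : List String) : List (List String × List String) :=
  pvFactorKeys ps (pvBKeys ps) path ++
    (if 2 ≤ ps.length ∧ ((pvBKeys ps).any fun t => decide (2 ≤ (pvBucket ps t).length)) = false ∧ path ≠ []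
     then [(path, ps.map Prod.fst)] else [])
  termination_by (pvSumLen ps, 1, (0 : Nat))
  decreasing_by exact Prod.Lex.right _ (Prod.Lex.left _ _ (by omega))
def pvFactorKeys (ps : List (String × List String)) (ks : List String) (path : List String) : List (List String × List String) :=
  match ks with
  | [] => []
  | t :: rest =>
      (if _h : pvBucket ps t = [] then [] else pvFactor (pvBucket ps t) (path ++ [t]))
        ++ pvFactorKeys ps rest path
  termination_by (pvSumLen ps, 0, ks.length)
  decreasing_by
    · refine Prod.Lex.left _ _ ?_
      have := pvBucket_sumLen_le ps t
      have hne : (pvBucket ps t).length ≠ 0 := by simpa [List.length_eq_zero_iff] using _h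
      omega
    · exact Prod.Lex.right _ (Prod.Lex.right _ (by simp))
end

def detect_no_print_py_alt (grammar_items : List (String × List String)) : (List (String × Bool × (List (List String × List String)))) × Int :=
  let res := grammar_items.foldl
    (fun (st : PySem.Dict String (Bool × List (List String × List String)) × Int) item =>
      if item.2.length < 2 then st
      else
        let charMode := pvChooseCharMode item.2
        let groups := pvFactor (item.2.map (fun p => (p, pvTokenize p charMode))) []
        if groups ≠ [] then (st.1.insert item.1 (charMode, groups), st.2 + (groups.length : Int))
        else st)
    (PySem.Dict.empty, 0)
  (res.1.items, res.2)

-- ===== PRECONDITION & SPEC =====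
def Spec_detect_no_print_py (grammar_items : List (String × List String)) (out : (List (String × Bool × (List (List String × List String)))) × Int) : Prop := out = detect_no_print_py_alt grammar_items
instance (grammar_items : List (String × List String)) (out : (List (String × Bool × (List (List String × List String)))) × Int) : Decidable (Spec_detect_no_print_py grammar_items out) := by
  unfold Spec_detect_no_print_py
  exact @instDecidableEqProd _ _ (@instDecidableEqList _ (by infer_instance)) (by infer_instance) _ _

-- ===== CLAIM (what is proved, stated in full; the proofs are below) =====
def Claim_equal_detect_no_print_py : Prop := ∀ (grammar_items : List (String × List String)), Dom_detect_no_print_py grammar_items → Spec_detect_no_print_py grammar_items (detect_no_print_py grammar_items)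

-- ===== LEMMAS AND PROOFS =====

-- proof-side helpers: characterisation of the built trie as partition-by-next-token
def pvFoldIns (c : PVTrie) (qs : List (String × List String)) : PVTrie :=
  qs.foldl (fun t x => pvTrieInsert t x.1 x.2) c

def pvTrieOf (qs : List (String × List String)) : PVTrie := pvFoldIns (.mk [] .nil) qs

def pvAppendC : PVChildren → PVChildren → PVChildren
  | .nil, b => b
  | .cons k c tail, b => .cons k c (pvAppendC tail b)

def pvKeysC : PVChildren → List String
  | .nil => []
  | .cons k _ tail => k :: pvKeysC tail

def pvMapB (ps : List (String × List String)) : PVChildren → PVChildren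
  | .nil => .nil
  | .cons k c tail => .cons k (pvFoldIns c (pvBucket ps k)) (pvMapB ps tail)

def pvChFromKeys (ps : List (String × List String)) : List String → PVChildren
  | [] => .nil
  | k :: ks => .cons k (pvTrieOf (pvBucket ps k)) (pvChFromKeys ps ks)

def pvMerge (ch : PVChildren) (ps : List (String × List String)) : PVChildren :=
  pvAppendC (pvMapB ps ch) (pvChFromKeys ps ((pvBKeys ps).filter (fun t => t ∉ pvKeysC ch)))

theorem pvFoldIns_append (c : PVTrie) (qs rs : List (String × List String)) :
    pvFoldIns c (qs ++ rs) = pvFoldIns (pvFoldIns c qs) rs := List.foldl_append ..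

theorem pvBucket_append (ps qs : List (String × List String)) (t : String) :
    pvBucket (ps ++ qs) t = pvBucket ps t ++ pvBucket qs t := List.filterMap_append ..

theorem pvBKeys_snoc_nil (ps : List (String × List String)) (p : String) :
    pvBKeys (ps ++ [(p, [])]) = pvBKeys ps := by
  simp [pvBKeys, List.foldl_append]

theorem pvBKeys_snoc_cons (ps : List (String × List String)) (p t : String) (r : List String) :
    pvBKeys (ps ++ [(p, t :: r)]) =
      if t ∈ pvBKeys ps then pvBKeys ps else pvBKeys ps ++ [t] := by
  simp [pvBKeys, List.foldl_append]

theorem mem_pvBKeys (ps : List (String × List String)) (t : String) :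
    t ∈ pvBKeys ps ↔ pvBucket ps t ≠ [] := by
  induction ps using List.reverseRecOn with
  | nil => simp [pvBKeys, pvBucket]
  | append_singleton ps x ih =>
    rcases x with ⟨p, toks⟩
    cases toks with
    | nil => simp [pvBKeys_snoc_nil, ih, pvBucket]
    | cons u r =>
      rw [pvBKeys_snoc_cons, pvBucket_append]
      by_cases hu : u = t
      · subst hu
        by_cases hmem : u ∈ pvBKeys ps <;> simp [hmem, pvBucket] at *
      · by_cases hmem : u ∈ pvBKeys ps <;> simp [hmem, pvBucket, hu, ih, Ne.symm hu]

theorem nodup_pvBKeys (ps : List (String × List String)) : (pvBKeys ps).Nodup := by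
  induction ps using List.reverseRecOn with
  | nil => simp [pvBKeys]
  | append_singleton ps x ih =>
    rcases x with ⟨p, toks⟩
    cases toks with
    | nil => simpa [pvBKeys_snoc_nil] using ih
    | cons u r =>
      rw [pvBKeys_snoc_cons]
      by_cases hmem : u ∈ pvBKeys ps <;> simp [hmem, ih, List.nodup_append]
      exact fun a ha e => hmem (e ▸ ha)

theorem pvAppendC_nilr : ∀ a, pvAppendC a .nil = a
  | .nil => rfl
  | .cons k c tail => by rw [pvAppendC, pvAppendC_nilr tail]

theorem pvKeysC_appendC : ∀ a b, pvKeysC (pvAppendC a b) = pvKeysC a ++ pvKeysC b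
  | .nil, b => rfl
  | .cons k c tail, b => by rw [pvAppendC, pvKeysC, pvKeysC, pvKeysC_appendC tail, List.cons_append]

theorem pvKeysC_mapB (ps : List (String × List String)) :
    ∀ ch, pvKeysC (pvMapB ps ch) = pvKeysC ch
  | .nil => rfl
  | .cons k c tail => by rw [pvMapB, pvKeysC, pvKeysC, pvKeysC_mapB ps tail]

theorem pvKeysC_chFromKeys (ps : List (String × List String)) :
    ∀ ks, pvKeysC (pvChFromKeys ps ks) = ks
  | [] => rfl
  | k :: ks => by rw [pvChFromKeys, pvKeysC, pvKeysC_chFromKeys ps ks]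

theorem pvMapB_congr (ps₁ ps₂ : List (String × List String)) :
    ∀ ch, (∀ k ∈ pvKeysC ch, pvBucket ps₁ k = pvBucket ps₂ k) → pvMapB ps₁ ch = pvMapB ps₂ ch
  | .nil, _ => rfl
  | .cons k c tail, h => by
      rw [pvMapB, pvMapB, h k (by simp [pvKeysC]),
        pvMapB_congr ps₁ ps₂ tail (fun x hx => h x (by simp [pvKeysC, hx]))]

theorem pvChFromKeys_congr (ps₁ ps₂ : List (String × List String)) :
    ∀ ks, (∀ k ∈ ks, pvBucket ps₁ k = pvBucket ps₂ k) → pvChFromKeys ps₁ ks = pvChFromKeys ps₂ ks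
  | [], _ => rfl
  | k :: ks, h => by
      rw [pvChFromKeys, pvChFromKeys, h k (by simp),
        pvChFromKeys_congr ps₁ ps₂ ks (fun x hx => h x (by simp [hx]))]

theorem pvChFromKeys_append (ps : List (String × List String)) :
    ∀ ks₁ ks₂, pvChFromKeys ps (ks₁ ++ ks₂) = pvAppendC (pvChFromKeys ps ks₁) (pvChFromKeys ps ks₂)
  | [], ks₂ => rfl
  | k :: ks₁, ks₂ => by
      rw [List.cons_append, pvChFromKeys, pvChFromKeys, pvAppendC, pvChFromKeys_append ps ks₁ ks₂]

theorem pvChildInsert_appendC (t p : String) (r : List String) :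
    ∀ a b, pvChildInsert (pvAppendC a b) t p r =
      if t ∈ pvKeysC a then pvAppendC (pvChildInsert a t p r) b
      else pvAppendC a (pvChildInsert b t p r)
  | .nil, b => by simp [pvAppendC, pvKeysC]
  | .cons k c tail, b => by
      by_cases hk : k = t
      · subst hk
        simp [pvAppendC, pvChildInsert, pvKeysC]
      · rw [pvAppendC, pvChildInsert, if_neg hk, pvChildInsert_appendC t p r tail b,
          pvChildInsert, if_neg hk]
        by_cases hmem : t ∈ pvKeysC tail <;>
          simp [pvKeysC, hmem, Ne.symm hk, pvAppendC]

theorem pvChildInsert_not_mem (t p : String) (r : List String) :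
    ∀ a, t ∉ pvKeysC a →
      pvChildInsert a t p r = pvAppendC a (.cons t (pvTrieInsert (.mk [] .nil) p r) .nil)
  | .nil, _ => by simp [pvChildInsert, pvAppendC]
  | .cons k c tail, h => by
      have hk : k ≠ t := by simp [pvKeysC] at h; exact fun e => h.1 e.symm
      have ht : t ∉ pvKeysC tail := by simp [pvKeysC] at h; exact h.2
      rw [pvChildInsert, if_neg hk, pvAppendC, pvChildInsert_not_mem t p r tail ht]

theorem pvChildInsert_mapB (ps : List (String × List String)) (t p : String) (r : List String) :
    ∀ ch, (pvKeysC ch).Nodup → t ∈ pvKeysC ch →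
      pvChildInsert (pvMapB ps ch) t p r = pvMapB (ps ++ [(p, t :: r)]) ch
  | .nil, _, hmem => by simp [pvKeysC] at hmem
  | .cons k c tail, hnd, hmem => by
      rw [pvKeysC] at hnd hmem
      by_cases hk : k = t
      · subst hk
        have htail : k ∉ pvKeysC tail := (List.nodup_cons.mp hnd).1
        rw [pvMapB, pvChildInsert, if_pos rfl, pvMapB,
          pvBucket_append, pvFoldIns_append]
        have hb : pvBucket [(p, k :: r)] k = [(p, r)] := by simp [pvBucket]
        rw [hb]
        have : pvFoldIns (pvFoldIns c (pvBucket ps k)) [(p, r)] =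
            pvTrieInsert (pvFoldIns c (pvBucket ps k)) p r := rfl
        rw [this, pvMapB_congr (ps ++ [(p, k :: r)]) ps tail]
        intro x hx
        have hxk : x ≠ k := fun e => htail (e ▸ hx)
        rw [pvBucket_append]
        simp [pvBucket, Ne.symm hxk]
      · have hmem' : t ∈ pvKeysC tail := by
          rcases List.mem_cons.mp hmem with h | h
          · exact absurd h.symm hk
          · exact h
        rw [pvMapB, pvChildInsert, if_neg hk, pvMapB,
          pvChildInsert_mapB ps t p r tail (List.nodup_cons.mp hnd).2 hmem',
          pvBucket_append]
        have : pvBucket [(p, t :: r)] k = [] := by simp [pvBucket, Ne.symm hk]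
        rw [this, List.append_nil]

theorem pvChildInsert_chFromKeys (ps : List (String × List String)) (t p : String) (r : List String) :
    ∀ ks, ks.Nodup → t ∈ ks →
      pvChildInsert (pvChFromKeys ps ks) t p r = pvChFromKeys (ps ++ [(p, t :: r)]) ks
  | [], _, hmem => by simp at hmem
  | k :: ks, hnd, hmem => by
      by_cases hk : k = t
      · subst hk
        have htail : k ∉ ks := (List.nodup_cons.mp hnd).1
        rw [pvChFromKeys, pvChildInsert, if_pos rfl, pvChFromKeys]
        have hb : pvBucket (ps ++ [(p, k :: r)]) k = pvBucket ps k ++ [(p, r)] := by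
          rw [pvBucket_append]; simp [pvBucket]
        rw [hb, pvTrieOf, pvTrieOf, pvFoldIns_append]
        have h1 : pvFoldIns (pvFoldIns (.mk [] .nil) (pvBucket ps k)) [(p, r)] =
            pvTrieInsert (pvFoldIns (.mk [] .nil) (pvBucket ps k)) p r := rfl
        rw [h1, pvChFromKeys_congr (ps ++ [(p, k :: r)]) ps ks]
        intro x hx
        have hxk : x ≠ k := fun e => htail (e ▸ hx)
        rw [pvBucket_append]
        simp [pvBucket, Ne.symm hxk]
      · have hmem' : t ∈ ks := by
          rcases List.mem_cons.mp hmem with h | h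
          · exact absurd h.symm hk
          · exact h
        rw [pvChFromKeys, pvChildInsert, if_neg hk, pvChFromKeys,
          pvChildInsert_chFromKeys ps t p r ks (List.nodup_cons.mp hnd).2 hmem',
          pvBucket_append]
        have : pvBucket [(p, t :: r)] k = [] := by simp [pvBucket, Ne.symm hk]
        rw [this, List.append_nil]

theorem pvMapB_nilps : ∀ ch, pvMapB [] ch = ch
  | .nil => rfl
  | .cons k c tail => by rw [pvMapB, pvMapB_nilps tail]; rfl

theorem pvMerge_snoc_nil (ch : PVChildren) (ps : List (String × List String)) (p : String) :
    pvMerge ch (ps ++ [(p, [])]) = pvMerge ch ps := by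
  have hb : ∀ k, pvBucket (ps ++ [(p, [])]) k = pvBucket ps k := by
    intro k; rw [pvBucket_append]; simp [pvBucket]
  rw [pvMerge, pvMerge, pvBKeys_snoc_nil,
    pvMapB_congr (ps ++ [(p, [])]) ps ch (fun k _ => hb k),
    pvChFromKeys_congr (ps ++ [(p, [])]) ps _ (fun k _ => hb k)]

theorem pvMerge_snoc_cons (ch : PVChildren) (ps : List (String × List String))
    (p t : String) (r : List String) (hnd : (pvKeysC ch).Nodup) :
    pvChildInsert (pvMerge ch ps) t p r = pvMerge ch (ps ++ [(p, t :: r)]) := by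
  rw [pvMerge, pvChildInsert_appendC, pvKeysC_mapB]
  by_cases hch : t ∈ pvKeysC ch
  · rw [if_pos hch, pvChildInsert_mapB ps t p r ch hnd hch, pvMerge, pvBKeys_snoc_cons]
    have hfilter : ∀ l : List String,
        (if t ∈ pvBKeys ps then pvBKeys ps else pvBKeys ps ++ [t]).filter
          (fun x => x ∉ pvKeysC ch) = (pvBKeys ps).filter (fun x => x ∉ pvKeysC ch) := by
      intro _
      by_cases hmem : t ∈ pvBKeys ps
      · rw [if_pos hmem]
      · rw [if_neg hmem, List.filter_append]
        simp [hch]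
    rw [hfilter []]
    congr 1
    apply pvChFromKeys_congr
    intro x hx
    have hxch : x ∉ pvKeysC ch := by
      have := List.of_mem_filter hx
      simpa using this
    have hxt : x ≠ t := fun e => hxch (e ▸ hch)
    rw [pvBucket_append]
    simp [pvBucket, Ne.symm hxt]
  · rw [if_neg hch, pvMerge, pvBKeys_snoc_cons,
      pvMapB_congr (ps ++ [(p, t :: r)]) ps ch (by
        intro x hx
        have hxt : x ≠ t := fun e => hch (e ▸ hx)
        rw [pvBucket_append]
        simp [pvBucket, Ne.symm hxt])]
    by_cases hbk : t ∈ pvBKeys ps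
    · rw [if_pos hbk]
      have hmemf : t ∈ (pvBKeys ps).filter (fun x => x ∉ pvKeysC ch) := by
        apply List.mem_filter.mpr
        exact ⟨hbk, by simpa using hch⟩
      have hndf : ((pvBKeys ps).filter (fun x => x ∉ pvKeysC ch)).Nodup :=
        (nodup_pvBKeys ps).filter _
      rw [pvChildInsert_chFromKeys ps t p r _ hndf hmemf]
    · rw [if_neg hbk, List.filter_append]
      have : [t].filter (fun x => x ∉ pvKeysC ch) = [t] := by simp [hch]
      rw [this, pvChFromKeys_append]
      have hbnil : pvBucket ps t = [] := by
        by_contra hne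
        exact hbk ((mem_pvBKeys ps t).mpr hne)
      have hnew : pvChFromKeys (ps ++ [(p, t :: r)]) [t] =
          PVChildren.cons t (pvTrieInsert (.mk [] .nil) p r) .nil := by
        rw [pvChFromKeys, pvChFromKeys, pvBucket_append, hbnil]
        have : pvBucket [(p, t :: r)] t = [(p, r)] := by simp [pvBucket]
        rw [this, List.nil_append]
        rfl
      rw [hnew, pvChildInsert_not_mem t p r _ (by
        rw [pvKeysC_chFromKeys]
        intro hmem
        exact hbk (List.mem_filter.mp hmem).1), pvChFromKeys_congr (ps ++ [(p, t :: r)]) ps ((pvBKeys ps).filter _) (by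
        intro x hx
        have hxbk : x ∈ pvBKeys ps := (List.mem_filter.mp hx).1
        have hxt : x ≠ t := fun e => hbk (e ▸ hxbk)
        rw [pvBucket_append]
        simp [pvBucket, Ne.symm hxt])]

theorem pvFoldIns_char (ps : List (String × List String)) :
    ∀ (prods : List String) (ch : PVChildren), (pvKeysC ch).Nodup →
      pvFoldIns (.mk prods ch) ps = .mk (prods ++ ps.map Prod.fst) (pvMerge ch ps) := by
  induction ps using List.reverseRecOn with
  | nil =>
    intro prods ch _
    have hmerge : pvMerge ch [] = ch := by
      rw [pvMerge, pvMapB_nilps]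
      simp [pvBKeys, pvChFromKeys, pvAppendC_nilr]
    rw [hmerge]
    simp [pvFoldIns]
  | append_singleton ps x ih =>
    intro prods ch hnd
    rw [pvFoldIns_append, ih prods ch hnd]
    rcases x with ⟨p, toks⟩
    cases toks with
    | nil =>
      rw [show pvFoldIns (.mk (prods ++ ps.map Prod.fst) (pvMerge ch ps)) [(p, [])] =
          pvTrieInsert (.mk (prods ++ ps.map Prod.fst) (pvMerge ch ps)) p [] from rfl,
        pvTrieInsert, pvMerge_snoc_nil]
      simp
    | cons t r =>
      rw [show pvFoldIns (.mk (prods ++ ps.map Prod.fst) (pvMerge ch ps)) [(p, t :: r)] =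
          pvTrieInsert (.mk (prods ++ ps.map Prod.fst) (pvMerge ch ps)) p (t :: r) from rfl,
        pvTrieInsert, pvMerge_snoc_cons ch ps p t r hnd]
      simp

theorem pvTrieOf_char (ps : List (String × List String)) :
    pvTrieOf ps = .mk (ps.map Prod.fst) (pvChFromKeys ps (pvBKeys ps)) := by
  rw [pvTrieOf, pvFoldIns_char ps [] .nil (by simp [pvKeysC])]
  have h1 : pvMerge .nil ps = pvChFromKeys ps (pvBKeys ps) := by
    rw [pvMerge]
    have : pvMapB ps .nil = .nil := rfl
    rw [this]
    have : (pvBKeys ps).filter (fun t => t ∉ pvKeysC .nil) = pvBKeys ps := by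
      simp [pvKeysC]
    rw [this, pvAppendC]
  rw [h1, List.nil_append]

theorem pvProds_trieOf (ps : List (String × List String)) :
    (pvTrieOf ps).prods = ps.map Prod.fst := by
  rw [pvTrieOf_char]; rfl

theorem pvAnyGroup_chFromKeys (ps : List (String × List String)) :
    ∀ ks, pvAnyGroup (pvChFromKeys ps ks) =
      ks.any (fun t => decide (2 ≤ (pvBucket ps t).length))
  | [] => rfl
  | k :: ks => by
      rw [pvChFromKeys, pvAnyGroup, pvAnyGroup_chFromKeys ps ks, pvProds_trieOf, List.any_cons,
        List.length_map]

theorem pvSumLen_zero_bKeys (ps : List (String × List String)) (h : pvSumLen ps = 0) :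
    pvBKeys ps = [] := by
  rw [List.eq_nil_iff_forall_not_mem]
  intro t hmem
  have hne := (mem_pvBKeys ps t).mp hmem
  have hle := pvBucket_sumLen_le ps t
  have : (pvBucket ps t).length = 0 := by omega
  exact hne (List.length_eq_zero_iff.mp this)

theorem pv_main : ∀ (n : Nat) (ps : List (String × List String)) (path : List String),
    pvSumLen ps ≤ n → pvDfs (pvTrieOf ps) path = pvFactor ps path := by
  intro n
  induction n with
  | zero =>
    intro ps path hle
    have hk := pvSumLen_zero_bKeys ps (Nat.le_zero.mp hle)
    rw [pvTrieOf_char, hk, pvDfs, pvFactor, hk]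
    simp [pvChFromKeys, pvDfsC, pvFactorKeys, pvAnyGroup]
  | succ n ihn =>
    intro ps path hle
    rw [pvTrieOf_char, pvDfs, pvFactor]
    have hdfsC : ∀ ks, pvDfsC (pvChFromKeys ps ks) path = pvFactorKeys ps ks path := by
      intro ks
      induction ks with
      | nil => simp [pvChFromKeys, pvDfsC, pvFactorKeys]
      | cons t rest ihk =>
        rw [pvChFromKeys, pvDfsC, pvFactorKeys, ihk]
        congr 1
        by_cases hb : pvBucket ps t = []
        · rw [dif_pos hb, hb]
          rw [show pvTrieOf [] = PVTrie.mk [] .nil from rfl, pvDfs]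
          simp [pvDfsC, pvAnyGroup]
        · rw [dif_neg hb]
          apply ihn
          have hlen : (pvBucket ps t).length ≠ 0 := by
            simpa [List.length_eq_zero_iff] using hb
          have := pvBucket_sumLen_le ps t
          omega
    rw [hdfsC, pvAnyGroup_chFromKeys]
    simp
theorem pv_groups (prods : List String) (cm : Bool) :
    pvDfs (pvBuildTrie prods cm) [] = pvFactor (prods.map fun p => (p, pvTokenize p cm)) [] := by
  have h1 : pvBuildTrie prods cm = pvTrieOf (prods.map fun p => (p, pvTokenize p cm)) := by
    rw [pvBuildTrie, pvTrieOf, pvFoldIns, List.foldl_map]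
  rw [h1]
  exact pv_main (pvSumLen _) _ _ le_rfl

-- ===== VERDICT (by name: the statement is the Claim_ definition above) =====
theorem detect_no_print_py_spec : Claim_equal_detect_no_print_py := by
  intro g _
  unfold Spec_detect_no_print_py detect_no_print_py detect_no_print_py_alt
  have hstep : (fun (st : PySem.Dict String (Bool × List (List String × List String)) × Int)
        (item : String × List String) =>
      if item.2.length < 2 then st
      else
        let charMode := pvChooseCharMode item.2
        let root := pvBuildTrie item.2 charMode
        let groups := pvDfs root []
        if groups ≠ [] then (st.1.insert item.1 (charMode, groups), st.2 + (groups.length : Int))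
        else st) =
      (fun (st : PySem.Dict String (Bool × List (List String × List String)) × Int)
        (item : String × List String) =>
      if item.2.length < 2 then st
      else
        let charMode := pvChooseCharMode item.2
        let groups := pvFactor (item.2.map (fun p => (p, pvTokenize p charMode))) []
        if groups ≠ [] then (st.1.insert item.1 (charMode, groups), st.2 + (groups.length : Int))
        else st) := by
    funext st item
    simp only [pv_groups]
  rw [hstep]
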